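-- pv_equiv track=rewrite | github.com/PhanSayam/M1_Info | Crypto/CC1/CC1.py | ord
-- ===== SOURCE A (Python) =====
-- def ord(a, n):
--     x = a % n
--     y = n
--     while x != 0:
--         t = x
--         x = y % x
--         y = t
--     return n // y
-- ===== SOURCE B (Python) =====
-- def _g(x, y):
--     # binary (Stein) gcd on non-negative integers
--     if x == 0:
--         return y
--     if y == 0:
--         return x
--     if x % 2 == 0:
--         if y % 2 == 0:
--             return 2 * _g(x // 2, y // 2)
--         return _g(x // 2, y)
--     if y % 2 == 0:
--         return _g(x, y // 2)
--     return _g(abs(x - y) // 2, min(x, y))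
--
-- def ord(a, n):
--     return abs(n) // _g(abs(a), abs(n))
-- ===== Notes on version B (the rewrite author's own statement) =====
-- stated objective: alternative
-- what changed: Replaces the iterative Euclidean remainder loop on signed ints with a recursive binary (Stein) GCD on absolute values, then one exact division abs(n)//g.
import Mathlib
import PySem

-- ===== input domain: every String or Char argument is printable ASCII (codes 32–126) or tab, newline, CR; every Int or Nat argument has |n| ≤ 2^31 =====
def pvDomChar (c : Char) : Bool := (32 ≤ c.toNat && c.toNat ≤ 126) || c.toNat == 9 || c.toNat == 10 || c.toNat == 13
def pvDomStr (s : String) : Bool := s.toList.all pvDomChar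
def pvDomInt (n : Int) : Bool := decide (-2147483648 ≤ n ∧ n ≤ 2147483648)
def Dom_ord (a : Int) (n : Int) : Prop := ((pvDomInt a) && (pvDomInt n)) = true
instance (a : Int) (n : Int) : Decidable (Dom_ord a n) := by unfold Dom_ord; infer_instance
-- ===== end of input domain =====

-- B replaces A's iterative Euclidean remainder loop on signed ints with a recursive
-- binary (Stein) gcd on absolute values followed by one division (objective: alternative).

-- ===== PORT A =====
-- termination fact for A's while-loop (cited by decreasing_by): |y % x| < |x| when x ≠ 0
theorem pv_fmod_natAbs_lt (y x : Int) (h : x ≠ 0) :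
    (PySem.Int.mod y x).natAbs < x.natAbs := by
  rcases lt_or_gt_of_ne h with hx | hx
  · have := PySem.Int.mod_neg_bounds y hx; omega
  · have h1 := PySem.Int.mod_nonneg y hx
    have h2 := PySem.Int.mod_lt y hx; omega

-- A's 'while x != 0' loop over the state (x, y): t = x; x = y % x; y = t
def ordLoop (x y : Int) : Int :=
  if h : x ≠ 0 then ordLoop (PySem.Int.mod y x) x else y
termination_by x.natAbs
decreasing_by exact pv_fmod_natAbs_lt y x h

def ord (a : Int) (n : Int) : Int :=
  PySem.Int.floordiv n (ordLoop (PySem.Int.mod a n) n)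

-- ===== PORT B =====
-- Source B's _g: binary (Stein) gcd; both call sites pass non-negative ints, so the port
-- lives on Nat (exact there); Python's `abs(x - y)` is ported as ((x:Int) - y).natAbs.
def gBin (x y : Nat) : Nat :=
  if x = 0 then y
  else if y = 0 then x
  else if x % 2 = 0 then
    if y % 2 = 0 then 2 * gBin (x / 2) (y / 2)
    else gBin (x / 2) y
  else if y % 2 = 0 then gBin x (y / 2)
  else gBin (((x : Int) - (y : Int)).natAbs / 2) (min x y)
termination_by x + y
decreasing_by all_goals omega

def ord_alt (a : Int) (n : Int) : Int :=
  PySem.Int.floordiv (n.natAbs : Int) ((gBin a.natAbs n.natAbs : Nat) : Int)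

-- ===== PRECONDITION & SPEC =====
-- Pre_ excludes exactly n = 0, where A raises ZeroDivisionError at 'a % n'.
def Pre_ord (a : Int) (n : Int) : Prop := n ≠ 0
instance (a : Int) (n : Int) : Decidable (Pre_ord a n) := by unfold Pre_ord; infer_instance
def pvWitness_ord : Int × Int := (4, 6)

def Spec_ord (a : Int) (n : Int) (out : Int) : Prop := out = ord_alt a n
instance (a : Int) (n : Int) (out : Int) : Decidable (Spec_ord a n out) := by unfold Spec_ord; infer_instance

-- ===== CLAIM (what is proved, stated in full; the proofs are below) =====
def Claim_equal_ord : Prop := ∀ (a : Int) (n : Int), Dom_ord a n → Pre_ord a n → Spec_ord a n (ord a n)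

-- ===== LEMMAS AND PROOFS =====

theorem cop2 (n : Nat) (h : n % 2 = 1) : Nat.Coprime 2 n := by
  rw [Nat.prime_two.coprime_iff_not_dvd]; omega

-- B's binary gcd computes Nat.gcd
theorem gBin_eq_gcd (x y : Nat) : gBin x y = Nat.gcd x y := by
  fun_induction gBin x y
  next y => simp
  next x hx => simp
  next x y hx hy hx2 hy2 ih =>
    rw [ih]
    conv_rhs => rw [show x = 2 * (x / 2) by omega, show y = 2 * (y / 2) by omega]
    rw [Nat.gcd_mul_left]
  next x y hx hy hx2 hy2 ih =>
    rw [ih]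
    conv_rhs => rw [show x = 2 * (x / 2) by omega]
    rw [Nat.Coprime.gcd_mul_left_cancel _ (cop2 y (by omega))]
  next x y hx hy hx2 hy2 ih =>
    rw [ih]
    conv_rhs => rw [show y = 2 * (y / 2) by omega]
    rw [Nat.Coprime.gcd_mul_left_cancel_right _ (cop2 x (by omega))]
  next x y hx hy hx2 hy2 ih =>
    rw [ih]
    rcases le_total x y with hle | hle
    · have hd : ((x : Int) - y).natAbs = y - x := by omega
      have hmin : min x y = x := by omega
      rw [hd, hmin]
      have h1 : Nat.gcd ((y - x) / 2) x = Nat.gcd (y - x) x := by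
        conv_rhs => rw [show y - x = 2 * ((y - x) / 2) by omega]
        rw [Nat.Coprime.gcd_mul_left_cancel _ (cop2 x (by omega))]
      rw [h1, Nat.gcd_sub_self_left hle, Nat.gcd_comm]
    · have hd : ((x : Int) - y).natAbs = x - y := by omega
      have hmin : min x y = y := by omega
      rw [hd, hmin]
      have h1 : Nat.gcd ((x - y) / 2) y = Nat.gcd (x - y) y := by
        conv_rhs => rw [show x - y = 2 * ((x - y) / 2) by omega]
        rw [Nat.Coprime.gcd_mul_left_cancel _ (cop2 y (by omega))]
      rw [h1, Nat.gcd_sub_self_left hle]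

-- a nonzero Python remainder has the divisor's sign
theorem pv_sign_mod (y x : Int) (hx : x ≠ 0) (h0 : PySem.Int.mod y x ≠ 0) :
    (PySem.Int.mod y x).sign = x.sign := by
  rcases lt_or_gt_of_ne hx with h | h
  · have hb := PySem.Int.mod_neg_bounds y h
    rw [Int.sign_eq_neg_one_of_neg (by omega), Int.sign_eq_neg_one_of_neg h]
  · have h1 := PySem.Int.mod_nonneg y h
    have h2 := PySem.Int.mod_lt y h
    rw [Int.sign_eq_one_of_pos (by omega), Int.sign_eq_one_of_pos h]

-- the Euclid step preserves the gcd
theorem pv_gcd_mod (y x : Int) : Int.gcd (PySem.Int.mod y x) x = Int.gcd x y := by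
  show Int.gcd (Int.fmod y x) x = _
  rw [Int.gcd_comm _ x, Int.fmod_def, Int.gcd_sub_mul_left_right]

-- A's loop computes sign x * gcd(x, y) for x ≠ 0
theorem ordLoop_eq_aux : ∀ (m : Nat) (x y : Int), x.natAbs ≤ m → x ≠ 0 →
    ordLoop x y = x.sign * (Int.gcd x y : Int) := by
  intro m
  induction m with
  | zero => intro x y h hx; omega
  | succ m ih =>
    intro x y h hx
    rw [ordLoop]
    simp only [hx, ne_eq, not_false_eq_true, dite_true]
    by_cases h0 : PySem.Int.mod y x = 0
    · rw [h0, ordLoop]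
      simp only [ne_eq, not_true_eq_false, dite_false]
      have hdvd : x ∣ y := (PySem.Int.mod_eq_zero_iff_dvd y x).mp h0
      rw [Int.gcd_eq_natAbs_left hdvd, Int.sign_mul_natAbs]
    · rw [ih (PySem.Int.mod y x) x (by have := pv_fmod_natAbs_lt y x hx; omega) h0,
         pv_sign_mod y x hx h0, pv_gcd_mod y x]

theorem pv_floordiv_eq_fdiv : PySem.Int.floordiv = Int.fdiv := rfl

theorem pv_main (a n : Int) (hn : n ≠ 0) :
    PySem.Int.floordiv n (ordLoop (PySem.Int.mod a n) n)
      = ((n.natAbs / Nat.gcd a.natAbs n.natAbs : Nat) : Int) := by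
  have hgcd : Nat.gcd a.natAbs n.natAbs = Int.gcd a n := rfl
  rw [hgcd]
  have hg0 : Int.gcd a n ≠ 0 := by
    simp [Int.gcd_eq_zero_iff]; intro _; exact hn
  have hnat : Int.gcd a n ∣ n.natAbs := by
    have := Int.gcd_dvd_right (a := a) (b := n)
    exact Int.natAbs_dvd_natAbs.mpr (by simpa using this)
  have hq : n.natAbs = Int.gcd a n * (n.natAbs / Int.gcd a n) :=
    (Nat.mul_div_cancel' hnat).symm
  by_cases h0 : PySem.Int.mod a n = 0
  · rw [h0, ordLoop]
    simp only [ne_eq, not_true_eq_false, dite_false]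
    have hdvd : n ∣ a := (PySem.Int.mod_eq_zero_iff_dvd a n).mp h0
    have : Int.gcd a n = n.natAbs := Int.gcd_eq_natAbs_right hdvd
    rw [this, Nat.div_self (by omega), pv_floordiv_eq_fdiv, Int.fdiv_self]
    · simp
    · exact hn
  · rw [ordLoop_eq_aux (PySem.Int.mod a n).natAbs _ _ le_rfl h0,
        pv_sign_mod a n hn h0, pv_gcd_mod a n, Int.gcd_comm n a,
        pv_floordiv_eq_fdiv]
    have hne : n.sign * (Int.gcd a n : Int) ≠ 0 :=
      mul_ne_zero (by simp [Int.sign_eq_zero_iff_zero, hn]) (by exact_mod_cast hg0)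
    calc Int.fdiv n (n.sign * (Int.gcd a n : Int))
        = Int.fdiv ((n.sign * (Int.gcd a n : Int)) * ((n.natAbs / Int.gcd a n : Nat) : Int))
            (n.sign * (Int.gcd a n : Int)) := by
          congr 1
          conv_lhs => rw [← Int.sign_mul_natAbs n]
          rw [mul_assoc]
          congr 1
          exact_mod_cast congrArg (fun m : Nat => (m : Int)) hq
      _ = _ := Int.mul_fdiv_cancel_left _ hne

-- ===== VERDICT (by name: the statement is the Claim_ definition above) =====
theorem ord_spec : Claim_equal_ord := by
  intro a n _ hn
  unfold Spec_ord ord ord_alt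
  rw [gBin_eq_gcd, PySem.Int.floordiv_natCast]
  exact pv_main a n hn
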